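-- pv_equiv track=rewrite | github.com/FE-Nerdy/Algorithm | SWAcademy/GoHigher.py | findMaxFloor
-- ===== SOURCE A (Python) =====
-- def findMaxFloor(N, P):
--     maxHeight = N * (N + 1) // 2
--     dp = [False] * (maxHeight + 1)
--     dp[0] = True
--
--     # DP
--     for i in range(1, N + 1):
--         for j in range(maxHeight, i - 1, -1):
--             if dp[j - i] and j != P:
--                 dp[j] = True
--
--     # 가장 높은 층 찾기
--     for floor in range(maxHeight, -1, -1):
--         if dp[floor]:
--             return floor
--     return 0
-- ===== SOURCE B (Python) =====
-- def findMaxFloor(N, P):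
--     # Closed form: using each of the moves 1..N once we can reach every sum,
--     # and the greedy chain 1, 1+2, ..., N(N+1)/2 is blocked exactly when P is
--     # one of the triangular numbers T_k (1 <= k <= N); then the best is m - 1
--     # (take the chain 2, 2+3, ..., which never lands on a triangular number).
--     if N <= 0:
--         return 0
--     m = N * (N + 1) // 2
--     if P < 1 or P > m:
--         return m
--     # binary search for k in [1, N] with k*(k+1)//2 == P
--     lo, hi = 1, N
--     while lo <= hi:
--         mid = (lo + hi) // 2
--         t = mid * (mid + 1) // 2
--         if t == P:
--             return m - 1
--         if t < P:
--             lo = mid + 1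
--         else:
--             hi = mid - 1
--     return m
-- ===== Notes on version B (the rewrite author's own statement) =====
-- stated objective: faster
-- what changed: Replaces the O(N*maxHeight) subset-sum DP table plus linear scan by a closed form (max = N(N+1)/2, minus 1 exactly when P is a triangular number T_k with 1<=k<=N, found by binary search), so no table is built at all.
import Mathlib
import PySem

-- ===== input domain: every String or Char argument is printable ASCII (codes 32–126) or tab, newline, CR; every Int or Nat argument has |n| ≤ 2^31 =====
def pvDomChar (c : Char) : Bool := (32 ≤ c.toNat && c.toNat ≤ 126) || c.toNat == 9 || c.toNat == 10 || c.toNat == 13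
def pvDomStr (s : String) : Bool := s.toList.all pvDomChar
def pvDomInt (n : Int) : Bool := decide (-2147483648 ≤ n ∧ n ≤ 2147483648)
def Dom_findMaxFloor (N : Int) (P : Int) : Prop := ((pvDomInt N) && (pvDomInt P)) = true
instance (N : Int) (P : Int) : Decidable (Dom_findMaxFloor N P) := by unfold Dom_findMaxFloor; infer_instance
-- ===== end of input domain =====

-- B replaces A's O(N·maxHeight) subset-sum DP table and scan by a closed form with a binary
-- search for whether P is a triangular number (objective: faster, asymptotically).

-- ===== PORT A =====
-- Literal port of A's DP. Indexing notes on exactness: maxHeight = N*(N+1)//2 ≥ 0 always, so the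
-- list has ≥ 1 cell and dp[0] = True is in range; in the inner loop i ≤ j ≤ maxHeight, so the
-- reads dp[j-i] (0 ≤ j-i) and writes dp[j] are always in range (the `.getD false` / `.toNat`
-- are never reached out of range / on a negative index).
def findMaxFloor (N : Int) (P : Int) : Int :=
  let maxHeight := PySem.Int.floordiv (N * (N + 1)) 2
  let dp0 : Array Bool := (Array.replicate (maxHeight + 1).toNat false).setIfInBounds 0 true
  let dp := (PySem.List.pyRange 1 (N + 1) 1).foldl (fun dp i =>
      (PySem.List.pyRange maxHeight (i - 1) (-1)).foldl (fun dp j =>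
        if ((dp[(j - i).toNat]?).getD false) && (j != P) then
          dp.setIfInBounds j.toNat true
        else dp) dp) dp0
  -- final loop: first floor (from the top) with dp[floor]; the trailing `return 0` is `.getD 0`
  ((PySem.List.pyRange maxHeight (-1) (-1)).find? (fun fl =>
      (dp[fl.toNat]?).getD false)).getD 0

-- ===== PORT B =====
-- the `while lo <= hi` binary search of Source B
def triSearch (P : Int) (lo hi : Int) : Bool :=
  if h : lo ≤ hi then
    let mid := PySem.Int.floordiv (lo + hi) 2
    let t := PySem.Int.floordiv (mid * (mid + 1)) 2
    if t = P then true
    else if t < P then triSearch P (mid + 1) hi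
    else triSearch P lo (mid - 1)
  else false
termination_by (hi + 1 - lo).toNat
decreasing_by
  · have := PySem.Int.floordiv_two_mid_bounds h
    omega
  · have := PySem.Int.floordiv_two_mid_bounds h
    omega

def findMaxFloor_alt (N : Int) (P : Int) : Int :=
  if N ≤ 0 then 0
  else
    let m := PySem.Int.floordiv (N * (N + 1)) 2
    if P < 1 ∨ m < P then m
    else if triSearch P 1 N then m - 1 else m

-- ===== PRECONDITION & SPEC =====
def Spec_findMaxFloor (N : Int) (P : Int) (out : Int) : Prop := out = findMaxFloor_alt N P
instance (N : Int) (P : Int) (out : Int) : Decidable (Spec_findMaxFloor N P out) := by unfold Spec_findMaxFloor; infer_instance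

-- ===== CLAIM (what is proved, stated in full; the proofs are below) =====
def Claim_equal_findMaxFloor : Prop := ∀ (N : Int) (P : Int), Dom_findMaxFloor N P → Spec_findMaxFloor N P (findMaxFloor N P)

-- ===== LEMMAS AND PROOFS =====

-- triangular numbers over Nat
def triN (k : Nat) : Nat := k * (k + 1) / 2

theorem triN_succ (k : Nat) : triN (k + 1) = triN k + (k + 1) := by
  unfold triN
  have : (k + 1) * (k + 1 + 1) = k * (k + 1) + 2 * (k + 1) := by ring
  omega

theorem triN_mono {a b : Nat} (h : a ≤ b) : triN a ≤ triN b := by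
  induction b with
  | zero => simp [Nat.le_zero.mp h]
  | succ b ih =>
    rcases Nat.lt_or_ge a (b+1) with h' | h'
    · have := ih (by omega); rw [triN_succ]; omega
    · have : a = b + 1 := by omega
      simp [this]

theorem le_triN (k : Nat) : k ≤ triN k := by
  induction k with
  | zero => simp [triN]
  | succ k ih => rw [triN_succ]; omega

-- x strictly between two consecutive triangular numbers is not triangular
theorem not_triN {i x : Nat} (h1 : triN i < x) (h2 : x < triN (i + 1)) :
    ∀ k, triN k ≠ x := by
  intro k hk
  rcases Nat.lt_or_ge k (i+1) with h | h
  · have := triN_mono (show k ≤ i by omega); omega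
  · have := triN_mono h; omega

-- the contents of A's dp array after the outer passes 0..i
def reachB (P : Int) : Nat → Nat → Bool
  | 0, j => j == 0
  | (i+1), j => reachB P i j ||
      (decide (((i : Int) + 1) ≤ (j : Int)) && decide ((j : Int) ≠ P) && reachB P i (j - (i + 1)))

-- one inner-pass update of a table described by g
def upd (P i : Int) (g : Nat → Bool) (j : Nat) : Bool :=
  g j || (decide (i ≤ (j : Int)) && decide ((j : Int) ≠ P) && g (j - i.toNat))

theorem upd_reachB (P : Int) (i : Nat) : upd P ((i : Int) + 1) (reachB P i) = reachB P (i + 1) := by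
  funext j
  simp only [upd, reachB]
  norm_num

theorem reachB_zero (P : Int) (i : Nat) : reachB P i 0 = true := by
  induction i with
  | zero => rfl
  | succ i ih => simp [reachB, ih]

theorem reachB_le (P : Int) (i j : Nat) (h : reachB P i j = true) : j ≤ triN i := by
  induction i generalizing j with
  | zero => simp [reachB] at h; simp [h, triN]
  | succ i ih =>
    simp only [reachB, Bool.or_eq_true, Bool.and_eq_true, decide_eq_true_eq] at h
    rw [triN_succ]
    rcases h with h | ⟨⟨h1, _⟩, h2⟩
    · have := ih _ h; omega
    · have := ih _ h2; omega

-- the full chain 1, 1+2, …, triN i is open iff no prefix triangular number is P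
theorem reachB_triN (P : Int) (i : Nat) :
    reachB P i (triN i) = true ↔ ∀ k, 1 ≤ k → k ≤ i → ((triN k : Int) ≠ P) := by
  induction i with
  | zero => simp [reachB, triN]; omega
  | succ i ih =>
    have hlt : triN i < triN (i + 1) := by rw [triN_succ]; omega
    have hfst : reachB P i (triN (i + 1)) = false := by
      by_contra h
      have := reachB_le P i (triN (i+1)) (by revert h; cases reachB P i (triN (i+1)) <;> simp)
      omega
    simp only [reachB, hfst, Bool.false_or, Bool.and_eq_true, decide_eq_true_eq]
    rw [triN_succ]
    have hsub : triN i + (i + 1) - (i + 1) = triN i := by omega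
    rw [hsub]
    constructor
    · rintro ⟨⟨hle, hne⟩, hr⟩ k hk1 hk2
      rcases Nat.lt_or_ge k (i+1) with h | h
      · exact (ih.mp hr) k hk1 (by omega)
      · have : k = i + 1 := by omega
        subst this
        rw [triN_succ]; exact_mod_cast hne
    · intro hall
      refine ⟨⟨?_, ?_⟩, ih.mpr (fun k h1 h2 => hall k h1 (by omega))⟩
      · have := le_triN i; push_cast; omega
      · have := hall (i+1) (by omega) (by omega)
        rw [triN_succ] at this; exact_mod_cast this
    
-- if P is triangular, the chain 2, 2+3, …, triN i - 1 still works
theorem reachB_triN_sub_one (P : Int) (k : Nat) (_hk : 1 ≤ k) (hP : (triN k : Int) = P) :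
    ∀ i, 1 ≤ i → reachB P i (triN i - 1) = true := by
  intro i
  induction i with
  | zero => omega
  | succ i ih =>
    intro _
    rcases Nat.eq_zero_or_pos i with h0 | hpos
    · subst h0
      have : triN 1 - 1 = 0 := by simp [triN]
      rw [this]; exact reachB_zero P 1
    -- i ≥ 1 : use the second disjunct with j = triN (i+1) - 1
    have hne : ((triN (i+1) - 1 : Nat) : Int) ≠ P := by
      rw [← hP]
      intro hcontra
      have heq : triN (i+1) - 1 = triN k := by exact_mod_cast hcontra
      rcases Nat.eq_or_lt_of_le hpos with h1 | h2
      · -- i = 1 : triN 2 - 1 = 2 is strictly between triN 1 = 1 and triN 2 = 3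
        have hi : i = 1 := h1.symm
        subst hi
        exact not_triN (i := 1) (x := 2) (by simp [triN]) (by simp [triN]) k (by
          simpa [show triN 2 - 1 = 2 by simp [triN]] using heq.symm)
      · -- i ≥ 2 : triN (i+1) - 1 is strictly between triN i and triN (i+1)
        have hgap : triN i + (i+1) = triN (i+1) := (triN_succ i).symm
        have h1 : triN i < triN (i+1) - 1 := by omega
        have h2 : triN (i+1) - 1 < triN (i+1) := by have := le_triN (i+1); omega
        exact not_triN h1 h2 k heq.symm
    rcases Nat.eq_or_lt_of_le hpos with h1 | h2
    · -- i = 1 : target 2, reach via 0 + 2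
      have hi : i = 1 := h1.symm
      subst hi
      have h2' : triN 2 - 1 = 2 := by simp [triN]
      simp only [reachB, h2', Bool.or_eq_true, Bool.and_eq_true, decide_eq_true_eq]
      right
      refine ⟨⟨by norm_num, by simp [h2'] at hne ⊢; exact hne⟩, by simp⟩
    · -- i ≥ 2
      have hstep : triN (i+1) = triN i + (i+1) := triN_succ i
      have hti : 3 ≤ triN i := by
        have := triN_mono (show 2 ≤ i by omega)
        simp [triN] at this ⊢; omega
      simp only [reachB, Bool.or_eq_true, Bool.and_eq_true, decide_eq_true_eq]
      right
      refine ⟨⟨by omega, hne⟩, ?_⟩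
      have : triN (i+1) - 1 - (i+1) = triN i - 1 := by omega
      rw [this]
      exact ih (by omega)

-- ---- the inner (descending) fold of port A ----

theorem innerFold (P m i : Int) (hi : 1 ≤ i) (g : Nat → Bool) :
    ∀ (fuel : Nat) (t : Int) (dp : Array Bool), (t - (i - 1)).toNat = fuel →
    i - 1 ≤ t → t ≤ m → dp.size = (m + 1).toNat →
    (∀ j : Nat, (j : Int) ≤ m → dp[j]? = some (if t < (j : Int) then upd P i g j else g j)) →
    ((PySem.List.pyRange t (i - 1) (-1)).foldl (fun dp j =>
        if ((dp[(j - i).toNat]?).getD false) && (j != P) then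
          dp.setIfInBounds j.toNat true
        else dp) dp).size = (m + 1).toNat ∧
    ∀ j : Nat, (j : Int) ≤ m →
      ((PySem.List.pyRange t (i - 1) (-1)).foldl (fun dp j =>
        if ((dp[(j - i).toNat]?).getD false) && (j != P) then
          dp.setIfInBounds j.toNat true
        else dp) dp)[j]? = some (upd P i g j) := by
  intro fuel
  induction fuel with
  | zero =>
    intro t dp hf h1 h2 hlen hinv
    have ht : t = i - 1 := by omega
    subst ht
    rw [PySem.List.pyRange_neg_one_eq_nil (le_refl _)]
    simp only [List.foldl_nil]
    refine ⟨hlen, fun j hj => ?_⟩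
    have h := hinv j hj
    by_cases hc : (i - 1 : Int) < (j : Int)
    · rw [if_pos hc] at h; exact h
    · rw [if_neg hc] at h
      rw [h]
      have hni : ¬ (i ≤ (j : Int)) := by omega
      simp [upd, hni]
  | succ fuel ih =>
    intro t dp hf h1 h2 hlen hinv
    have ht : i - 1 < t := by omega
    rw [PySem.List.pyRange_neg_one_cons ht]
    simp only [List.foldl_cons]
    have hread : dp[(t - i).toNat]? = some (g (t - i).toNat) := by
      have h := hinv (t - i).toNat (by omega)
      rw [if_neg (by omega)] at h
      exact h
    rw [hread]
    simp only [Option.getD_some]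
    have hsub : t.toNat - i.toNat = (t - i).toNat := by omega
    by_cases hcond : (g (t - i).toNat && (t != P)) = true
    · rw [if_pos hcond]
      obtain ⟨hg, hne'⟩ : g (t - i).toNat = true ∧ t ≠ P := by simpa using hcond
      refine ih (t - 1) _ (by omega) (by omega) (by omega)
        (by rw [Array.size_setIfInBounds]; exact hlen) ?_
      intro j hj
      rw [Array.getElem?_setIfInBounds]
      by_cases hje : t.toNat = j
      · subst hje
        rw [if_pos rfl, if_pos (by omega : t.toNat < dp.size)]
        rw [if_pos (by omega : t - 1 < ((t.toNat : Nat) : Int))]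
        have hjt : ((t.toNat : Nat) : Int) = t := by omega
        simp [upd, hsub, hg, hjt, hne', (by omega : i ≤ t)]
      · rw [if_neg hje]
        have h := hinv j hj
        have hne2 : (j : Int) ≠ t := by omega
        by_cases hlt : t - 1 < (j : Int)
        · rw [if_pos hlt]
          rw [if_pos (by omega : t < (j : Int))] at h
          exact h
        · rw [if_neg hlt]
          rw [if_neg (by omega : ¬ t < (j : Int))] at h
          exact h
    · rw [if_neg hcond]
      refine ih (t - 1) _ (by omega) (by omega) (by omega) hlen ?_
      intro j hj
      have h := hinv j hj
      by_cases hje : t.toNat = j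
      · subst hje
        have hjt : ((t.toNat : Nat) : Int) = t := by omega
        rw [if_neg (by omega : ¬ t < ((t.toNat : Nat) : Int))] at h
        rw [if_pos (by omega : t - 1 < ((t.toNat : Nat) : Int)), h]
        have hor : g (t - i).toNat = false ∨ t = P := by
          by_cases hg : g (t - i).toNat = true
          · right; by_contra hP; exact hcond (by simp [hg, hP])
          · left; simpa using hg
        have hupd : upd P i g t.toNat = g t.toNat := by
          simp only [upd, hsub]
          rcases hor with h' | h'
          · simp [h']
          · have hP : ((t.toNat : Nat) : Int) = P := by omega
            simp [hP]
        rw [hupd]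
      · have hne2 : (j : Int) ≠ t := by omega
        by_cases hlt : t - 1 < (j : Int)
        · rw [if_pos hlt]
          rw [if_pos (by omega : t < (j : Int))] at h
          exact h
        · rw [if_neg hlt]
          rw [if_neg (by omega : ¬ t < (j : Int))] at h
          exact h

-- ---- the outer fold of port A ----

theorem outerFold (P m : Int) :
    ∀ (n : Nat) (dp : Array Bool), (n : Int) ≤ m → dp.size = (m + 1).toNat →
    (∀ j : Nat, (j : Int) ≤ m → dp[j]? = some (reachB P 0 j)) →
    ((PySem.List.pyRange 1 ((n : Int) + 1) 1).foldl (fun dp i =>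
      (PySem.List.pyRange m (i - 1) (-1)).foldl (fun dp j =>
        if ((dp[(j - i).toNat]?).getD false) && (j != P) then
          dp.setIfInBounds j.toNat true
        else dp) dp) dp).size = (m + 1).toNat ∧
    ∀ j : Nat, (j : Int) ≤ m →
      ((PySem.List.pyRange 1 ((n : Int) + 1) 1).foldl (fun dp i =>
        (PySem.List.pyRange m (i - 1) (-1)).foldl (fun dp j =>
          if ((dp[(j - i).toNat]?).getD false) && (j != P) then
            dp.setIfInBounds j.toNat true
          else dp) dp) dp)[j]? = some (reachB P n j) := by
  intro n
  induction n with
  | zero =>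
    intro dp h1 hlen hinv
    rw [show ((0 : Nat) : Int) + 1 = 1 by norm_num,
      PySem.List.pyRange_one_eq_nil (le_refl (1 : Int))]
    exact ⟨hlen, hinv⟩
  | succ n ih =>
    intro dp h1 hlen hinv
    have hcast : (((n + 1 : Nat)) : Int) + 1 = ((n : Int) + 1) + 1 := by push_cast; ring
    rw [hcast, PySem.List.pyRange_one_succ_right (by omega : (1 : Int) ≤ (n : Int) + 1),
      List.foldl_append]
    simp only [List.foldl_cons, List.foldl_nil]
    obtain ⟨hlen', hinv'⟩ := ih dp (by omega) hlen hinv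
    have hmain := innerFold P m ((n : Int) + 1) (by omega) (reachB P n)
      (m - (((n : Int) + 1) - 1)).toNat m _ rfl (by omega) (le_refl m) hlen' ?_
    · obtain ⟨hl, hv⟩ := hmain
      refine ⟨hl, fun j hj => ?_⟩
      rw [hv j hj, upd_reachB]
    · intro j hj
      rw [if_neg (by omega : ¬ m < (j : Int))]
      exact hinv' j hj

-- ---- the final (descending) scan of port A ----

theorem findDesc (p : Int → Bool) (M : Int) (hM : 0 ≤ M) (hp : p M = true) :
    ∀ (fuel : Nat) (m : Int), (m - M).toNat = fuel → M ≤ m →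
    (∀ j : Int, M < j → j ≤ m → p j = false) →
    (PySem.List.pyRange m (-1) (-1)).find? p = some M := by
  intro fuel
  induction fuel with
  | zero =>
    intro m hf h1 h2
    have hm : m = M := by omega
    subst hm
    rw [PySem.List.pyRange_neg_one_cons (by omega : (-1 : Int) < m)]
    rw [List.find?_cons_of_pos hp]
  | succ fuel ih =>
    intro m hf h1 h2
    rw [PySem.List.pyRange_neg_one_cons (by omega : (-1 : Int) < m)]
    rw [List.find?_cons_of_neg (by simp [h2 m (by omega) (le_refl m)])]
    exact ih (m - 1) (by omega) (by omega) (fun j hj1 hj2 => h2 j hj1 (by omega))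

-- ---- B's binary search is exactly "P is triangular within [lo, hi]" ----

theorem triI_strict_mono {a b : Int} (ha : 0 ≤ a) (hab : a < b) :
    PySem.Int.floordiv (a * (a + 1)) 2 < PySem.Int.floordiv (b * (b + 1)) 2 := by
  rw [PySem.Int.floordiv_eq_ediv_of_pos (by norm_num), PySem.Int.floordiv_eq_ediv_of_pos (by norm_num)]
  obtain ⟨x, hx⟩ := Int.even_mul_succ_self a
  obtain ⟨y, hy⟩ := Int.even_mul_succ_self b
  have hxy : x < y := by nlinarith
  have hax : a * (a + 1) = 2 * x := by omega
  have hby : b * (b + 1) = 2 * y := by omega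
  rw [hax, hby]
  omega

theorem triSearch_iff (P : Int) :
    ∀ (fuel : Nat) (lo hi : Int), (hi + 1 - lo).toNat ≤ fuel → 1 ≤ lo →
    (triSearch P lo hi = true ↔
      ∃ k : Int, lo ≤ k ∧ k ≤ hi ∧ PySem.Int.floordiv (k * (k + 1)) 2 = P) := by
  intro fuel
  induction fuel using Nat.strong_induction_on with
  | _ fuel ih =>
    intro lo hi hf hlo
    rw [triSearch]
    by_cases hle : lo ≤ hi
    · rw [dif_pos hle]
      have hmid := PySem.Int.floordiv_two_mid_bounds hle
      dsimp only
      by_cases h1 : PySem.Int.floordiv (PySem.Int.floordiv (lo + hi) 2 *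
          (PySem.Int.floordiv (lo + hi) 2 + 1)) 2 = P
      · rw [if_pos h1]
        exact ⟨fun _ => ⟨PySem.Int.floordiv (lo + hi) 2, hmid.1, hmid.2, h1⟩, fun _ => rfl⟩
      · rw [if_neg h1]
        by_cases h2 : PySem.Int.floordiv (PySem.Int.floordiv (lo + hi) 2 *
            (PySem.Int.floordiv (lo + hi) 2 + 1)) 2 < P
        · rw [if_pos h2]
          rw [ih (hi + 1 - (PySem.Int.floordiv (lo + hi) 2 + 1)).toNat (by omega) _ _ (le_refl _)
            (by omega)]
          constructor
          · rintro ⟨k, hk1, hk2, hk3⟩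
            exact ⟨k, by omega, hk2, hk3⟩
          · rintro ⟨k, hk1, hk2, hk3⟩
            refine ⟨k, ?_, hk2, hk3⟩
            by_contra hkm
            rcases Int.lt_or_le k (PySem.Int.floordiv (lo + hi) 2) with h | h
            · have := triI_strict_mono (by omega : (0 : Int) ≤ k) h
              omega
            · have hk : k = PySem.Int.floordiv (lo + hi) 2 := by omega
              rw [hk] at hk3
              exact h1 hk3
        · rw [if_neg h2]
          rw [ih (PySem.Int.floordiv (lo + hi) 2 - 1 + 1 - lo).toNat (by omega) _ _ (le_refl _) hlo]
          constructor
          · rintro ⟨k, hk1, hk2, hk3⟩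
            exact ⟨k, hk1, by omega, hk3⟩
          · rintro ⟨k, hk1, hk2, hk3⟩
            refine ⟨k, hk1, ?_, hk3⟩
            by_contra hkm
            rcases Int.lt_or_le (PySem.Int.floordiv (lo + hi) 2) k with h | h
            · have := triI_strict_mono (by omega : (0 : Int) ≤ PySem.Int.floordiv (lo + hi) 2) h
              omega
            · have hk : k = PySem.Int.floordiv (lo + hi) 2 := by omega
              rw [hk] at hk3
              exact h1 hk3
    · rw [dif_neg hle]
      constructor
      · intro h; exact absurd h (by simp)
      · rintro ⟨k, hk1, hk2, _⟩; omega

-- ---- glue ----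

-- casting the port's maxHeight to the Nat triangular number
theorem floordiv_tri_cast (n : Nat) :
    PySem.Int.floordiv ((n : Int) * ((n : Int) + 1)) 2 = ((triN n : Nat) : Int) := by
  have h : (n : Int) * ((n : Int) + 1) = ((n * (n + 1) : Nat) : Int) := by push_cast; ring
  rw [h, show (2 : Int) = ((2 : Nat) : Int) from rfl, PySem.Int.floordiv_natCast]
  simp [triN]

theorem findMaxFloor_eq (N P : Int) : findMaxFloor N P = findMaxFloor_alt N P := by
  have hprod : 0 ≤ N * (N + 1) := by nlinarith [sq_nonneg N, sq_nonneg (N + 1)]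
  have hm0 : 0 ≤ PySem.Int.floordiv (N * (N + 1)) 2 := by
    rw [PySem.Int.floordiv_eq_ediv_of_pos (by norm_num)]
    omega
  unfold findMaxFloor findMaxFloor_alt
  dsimp only
  -- facts about the initial table
  have hlen0 : ((Array.replicate (PySem.Int.floordiv (N * (N + 1)) 2 + 1).toNat
      false).setIfInBounds 0 true).size = (PySem.Int.floordiv (N * (N + 1)) 2 + 1).toNat := by
    simp
  have hinv0 : ∀ j : Nat, (j : Int) ≤ PySem.Int.floordiv (N * (N + 1)) 2 →
      ((Array.replicate (PySem.Int.floordiv (N * (N + 1)) 2 + 1).toNat false).setIfInBounds 0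
        true)[j]? = some (reachB P 0 j) := by
    intro j hj
    have hjlt : j < (PySem.Int.floordiv (N * (N + 1)) 2 + 1).toNat := by omega
    rw [Array.getElem?_setIfInBounds]
    by_cases h0 : 0 = j
    · subst h0
      rw [if_pos rfl, if_pos (by simpa using hjlt)]
      simp [reachB]
    · rw [if_neg h0, Array.getElem?_replicate, if_pos hjlt]
      have hj0 : j ≠ 0 := fun h => h0 h.symm
      simp [reachB, hj0]
  by_cases hN : N ≤ 0
  · -- no DP passes run; dp stays [True, False, …]; both sides return 0
    rw [if_pos hN, PySem.List.pyRange_one_eq_nil (by omega : N + 1 ≤ 1)]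
    simp only [List.foldl_nil]
    rw [findDesc _ 0 (le_refl 0) ?_ (PySem.Int.floordiv (N * (N + 1)) 2).toNat _ (by omega) hm0 ?_]
    · rfl
    · rw [show (0 : Int).toNat = (0 : Nat) from rfl, hinv0 0 (by omega)]
      rfl
    · intro j hj1 hj2
      rw [hinv0 j.toNat (by omega)]
      simp only [Option.getD_some]
      simp [reachB, show j.toNat ≠ 0 by omega]
  · -- N ≥ 1
    rw [if_neg hN]
    obtain ⟨n, hn⟩ : ∃ n : Nat, ((n : Nat) : Int) = N := ⟨N.toNat, by omega⟩
    subst hn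
    have hn1 : 1 ≤ n := by omega
    have hmtri : PySem.Int.floordiv ((n : Int) * ((n : Int) + 1)) 2 = ((triN n : Nat) : Int) :=
      floordiv_tri_cast n
    have hnm : ((n : Nat) : Int) ≤ PySem.Int.floordiv ((n : Int) * ((n : Int) + 1)) 2 := by
      rw [hmtri]
      exact_mod_cast le_triN n
    obtain ⟨hlenF, hinvF⟩ := outerFold P (PySem.Int.floordiv ((n : Int) * ((n : Int) + 1)) 2) n
      _ hnm hlen0 hinv0
    have hpval : ∀ j : Int, 0 ≤ j → j ≤ PySem.Int.floordiv ((n : Int) * ((n : Int) + 1)) 2 →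
        ((((PySem.List.pyRange 1 ((n : Int) + 1) 1).foldl
          (fun dp i => (PySem.List.pyRange (PySem.Int.floordiv ((n : Int) * ((n : Int) + 1)) 2)
            (i - 1) (-1)).foldl (fun dp j =>
              if ((dp[(j - i).toNat]?).getD false) && (j != P) then
                dp.setIfInBounds j.toNat true
              else dp) dp)
          ((Array.replicate (PySem.Int.floordiv ((n : Int) * ((n : Int) + 1)) 2 + 1).toNat
            false).setIfInBounds 0 true))[j.toNat]?).getD false) = reachB P n j.toNat := by
      intro j hj0 hjm
      rw [hinvF j.toNat (by omega)]
      rfl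
    by_cases hreach : reachB P n (triN n) = true
    · -- top floor open: both return maxHeight
      rw [findDesc _ (PySem.Int.floordiv ((n : Int) * ((n : Int) + 1)) 2) hm0 ?_ 0 _ (by omega)
        (le_refl _) ?_]
      · have hts : triSearch P 1 (n : Int) = false := by
          by_contra hts
          have hts' : triSearch P 1 (n : Int) = true := by
            revert hts; cases triSearch P 1 (n : Int) <;> simp
          obtain ⟨k, hk1, hk2, hk3⟩ := (triSearch_iff P ((n : Int) + 1 - 1).toNat 1 (n : Int)
            (le_refl _) (le_refl 1)).mp hts'
          have hkn : ((k.toNat : Nat) : Int) = k := by omega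
          have hPt : ((triN k.toNat : Nat) : Int) = P := by
            rw [← floordiv_tri_cast, hkn]; exact hk3
          exact absurd hPt
            (by exact_mod_cast (reachB_triN P n).mp hreach k.toNat (by omega) (by omega))
        rw [hts]
        simp only [Bool.false_eq_true, if_false, Option.getD_some]
        by_cases hPr : P < 1 ∨ PySem.Int.floordiv ((n : Int) * ((n : Int) + 1)) 2 < P
        · rw [if_pos hPr]
        · rw [if_neg hPr]
      · rw [hpval _ hm0 (le_refl _)]
        rw [show (PySem.Int.floordiv ((n : Int) * ((n : Int) + 1)) 2).toNat = triN n by omega]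
        exact hreach
      · intro j hj1 hj2
        omega
    · -- top floor blocked: P is a prefix triangular number; both return maxHeight - 1
      have hex : ∃ k, 1 ≤ k ∧ k ≤ n ∧ ((triN k : Nat) : Int) = P := by
        by_contra h
        exact hreach ((reachB_triN P n).mpr (fun k h1 h2 hEq => h ⟨k, h1, h2, hEq⟩))
      obtain ⟨k, hk1, hk2, hkP⟩ := hex
      have htk1 : 1 ≤ triN k := by
        have := triN_mono hk1
        simpa [triN] using this
      have h1P : 1 ≤ P := by rw [← hkP]; exact_mod_cast htk1
      have hPm : P ≤ PySem.Int.floordiv ((n : Int) * ((n : Int) + 1)) 2 := by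
        rw [← hkP, hmtri]
        exact_mod_cast triN_mono hk2
      have hreach' : reachB P n (triN n - 1) = true :=
        reachB_triN_sub_one P k hk1 hkP n hn1
      have htn1 : 1 ≤ triN n := le_trans htk1 (triN_mono hk2)
      have htnm : ((triN n : Nat) : Int) = PySem.Int.floordiv ((n : Int) * ((n : Int) + 1)) 2 :=
        hmtri.symm
      rw [findDesc _ (PySem.Int.floordiv ((n : Int) * ((n : Int) + 1)) 2 - 1) (by omega) ?_ 1 _
        (by omega) (by omega) ?_]
      · have hts : triSearch P 1 (n : Int) = true := by
          rw [triSearch_iff P ((n : Int) + 1 - 1).toNat 1 (n : Int) (le_refl _) (le_refl 1)]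
          refine ⟨((k : Nat) : Int), by omega, by exact_mod_cast hk2, ?_⟩
          rw [floordiv_tri_cast]
          exact hkP
        rw [hts, if_neg (by omega :
          ¬ (P < 1 ∨ PySem.Int.floordiv ((n : Int) * ((n : Int) + 1)) 2 < P))]
        simp
      · rw [hpval _ (by omega) (by omega)]
        rw [show (PySem.Int.floordiv ((n : Int) * ((n : Int) + 1)) 2 - 1).toNat = triN n - 1
          by omega]
        exact hreach'
      · intro j hj1 hj2
        have hj : j = PySem.Int.floordiv ((n : Int) * ((n : Int) + 1)) 2 := by omega
        rw [hj, hpval _ hm0 (le_refl _)]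
        rw [show (PySem.Int.floordiv ((n : Int) * ((n : Int) + 1)) 2).toNat = triN n by omega]
        revert hreach
        cases reachB P n (triN n) <;> simp

-- ===== VERDICT (by name: the statement is the Claim_ definition above) =====
theorem findMaxFloor_spec : Claim_equal_findMaxFloor := by
  intro N P _
  unfold Spec_findMaxFloor
  exact findMaxFloor_eq N P
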